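-- pv_equiv track=rewrite | github.com/jruizcanoie/calories | calories/algo.py | mostcom
-- ===== SOURCE A (Python) =====
-- def mostcom(reference, tocheck):
--
--     max_common = 0
--     common_lists = []
--     for sublist in tocheck:
--         num_common = sum(1 for element in sublist if element in reference)
--         if num_common > max_common:
--             max_common = num_common
--             common_lists = [sublist]
--         elif num_common == max_common:
--             common_lists.append(sublist)
--     return common_lists
-- ===== SOURCE B (Python) =====
-- def mostcom(reference, tocheck):
--     def cnt(sub):
--         return sum(1 for e in sub if e in reference)
--     ranked = sorted(tocheck, key=cnt, reverse=True)
--     out = []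
--     for sub in ranked:
--         if cnt(sub) != cnt(ranked[0]):
--             break
--         out.append(sub)
--     return out
-- ===== Notes on version B (the rewrite author's own statement) =====
-- stated objective: alternative
-- what changed: Replaced the running-max/reset accumulator loop by sort-then-scan: stably sort the sublists by common-count descending and take the leading run of maximal count (stability keeps the winners in original order).
import Mathlib
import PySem

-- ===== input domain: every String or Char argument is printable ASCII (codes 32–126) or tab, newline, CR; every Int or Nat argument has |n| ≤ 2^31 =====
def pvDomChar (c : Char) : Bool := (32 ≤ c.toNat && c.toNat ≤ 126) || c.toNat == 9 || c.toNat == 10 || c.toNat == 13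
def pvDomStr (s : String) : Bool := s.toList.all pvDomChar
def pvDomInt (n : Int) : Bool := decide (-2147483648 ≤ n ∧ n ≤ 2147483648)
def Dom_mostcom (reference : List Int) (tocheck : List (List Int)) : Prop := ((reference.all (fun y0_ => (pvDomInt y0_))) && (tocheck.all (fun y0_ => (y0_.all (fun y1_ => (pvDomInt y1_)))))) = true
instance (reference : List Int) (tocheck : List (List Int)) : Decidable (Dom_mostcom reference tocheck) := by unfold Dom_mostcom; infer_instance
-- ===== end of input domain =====

-- B replaces A's running-max/reset loop by sort-then-scan: stable descending sort by common-count, then the leading equal-count run (alternative algorithm, same result).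


-- ===== PORT A =====
-- loop state: (max_common, common_lists)
def mostcom (reference : List Int) (tocheck : List (List Int)) : List (List Int) :=
  (tocheck.foldl (fun (st : Int × List (List Int)) sublist =>
      let num_common : Int :=
        sublist.foldl (fun a element => if element ∈ reference then a + 1 else a) 0
      if num_common > st.1 then (num_common, [sublist])
      else if num_common = st.1 then (st.1, st.2 ++ [sublist])
      else st) ((0 : Int), ([] : List (List Int)))).2

-- ===== PORT B =====
-- cnt(sub) = sum(1 for e in sub if e in reference)
def mostcomCnt (reference : List Int) (sub : List Int) : Int :=
  sub.foldl (fun a e => if e ∈ reference then a + 1 else a) 0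

-- the 'for sub in ranked: if cnt(sub) != best: break; out.append(sub)' loop
def mostcomTake (k : List Int → Int) (best : Int) : List (List Int) → List (List Int)
  | [] => []
  | s :: rest => if k s ≠ best then [] else s :: mostcomTake k best rest

def mostcom_alt (reference : List Int) (tocheck : List (List Int)) : List (List Int) :=
  match PySem.List.sorted tocheck (mostcomCnt reference) true with
  | [] => []
  | h0 :: rest => mostcomTake (mostcomCnt reference) (mostcomCnt reference h0) (h0 :: rest)

-- ===== PRECONDITION & SPEC =====
def Spec_mostcom (reference : List Int) (tocheck : List (List Int)) (out : List (List Int)) : Prop := out = mostcom_alt reference tocheck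
instance (reference : List Int) (tocheck : List (List Int)) (out : List (List Int)) : Decidable (Spec_mostcom reference tocheck out) := by unfold Spec_mostcom; infer_instance

-- ===== CLAIM (what is proved, stated in full; the proofs are below) =====
def Claim_equal_mostcom : Prop := ∀ (reference : List Int) (tocheck : List (List Int)), Dom_mostcom reference tocheck → Spec_mostcom reference tocheck (mostcom reference tocheck)

-- ===== LEMMAS AND PROOFS =====

-- maximum of counts over the list (the value A's max_common ends with)
def mostcomMax (reference : List Int) (xs : List (List Int)) : Int :=
  xs.foldl (fun b s => max b (mostcomCnt reference s)) 0

theorem mostcomCnt_nonneg (reference sub : List Int) : 0 ≤ mostcomCnt reference sub := by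
  unfold mostcomCnt
  rw [PySem.List.foldl_ite_add_one (p := fun e => e ∈ reference)]
  positivity

theorem mostcomMax_append (reference : List Int) (xs : List (List Int)) (s : List Int) :
    mostcomMax reference (xs ++ [s]) = max (mostcomMax reference xs) (mostcomCnt reference s) := by
  simp [mostcomMax]

theorem cnt_le_mostcomMax (reference : List Int) (xs : List (List Int)) (s : List Int)
    (h : s ∈ xs) : mostcomCnt reference s ≤ mostcomMax reference xs :=
  (PySem.List.le_foldl_max_int xs (mostcomCnt reference) 0).2 s h

-- A's fold computes (max of counts, filter of count-equals-max)
theorem mostcom_invariant (reference : List Int) (xs : List (List Int)) :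
    xs.foldl (fun (st : Int × List (List Int)) sublist =>
      let num_common : Int :=
        sublist.foldl (fun a element => if element ∈ reference then a + 1 else a) 0
      if num_common > st.1 then (num_common, [sublist])
      else if num_common = st.1 then (st.1, st.2 ++ [sublist])
      else st) ((0 : Int), ([] : List (List Int)))
    = (mostcomMax reference xs,
       xs.filter (fun s => decide (mostcomCnt reference s = mostcomMax reference xs))) := by
  induction xs using List.reverseRecOn with
  | nil => simp [mostcomMax]
  | append_singleton xs s ih =>
    rw [List.foldl_append, ih, mostcomMax_append]
    simp only [List.foldl_cons, List.foldl_nil]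
    rw [show (s.foldl (fun a element => if element ∈ reference then a + 1 else a) 0)
          = mostcomCnt reference s from rfl]
    by_cases hgt : mostcomCnt reference s > mostcomMax reference xs
    · have hmax : max (mostcomMax reference xs) (mostcomCnt reference s)
          = mostcomCnt reference s := max_eq_right (le_of_lt hgt)
      have hfilt : xs.filter (fun t => decide (mostcomCnt reference t = mostcomCnt reference s)) = [] := by
        rw [List.filter_eq_nil_iff]
        intro t ht
        have := cnt_le_mostcomMax reference xs t ht
        simp only [decide_eq_true_eq]
        intro he; rw [he] at this; omega
      simp [hgt, hmax, List.filter_append, hfilt]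
    · by_cases heq : mostcomCnt reference s = mostcomMax reference xs
      · have hmax : max (mostcomMax reference xs) (mostcomCnt reference s)
            = mostcomMax reference xs := max_eq_left (le_of_eq heq)
        simp [heq, List.filter_append]
      · have hlt : mostcomCnt reference s < mostcomMax reference xs := by omega
        have hmax : max (mostcomMax reference xs) (mostcomCnt reference s)
            = mostcomMax reference xs := max_eq_left (le_of_lt hlt)
        simp [hgt, hmax, heq, List.filter_append]

-- insertBy walks past a prefix it does not go before
theorem insertBy_pass (before : List Int → List Int → Bool) (x : List Int)
    (P Q : List (List Int)) (hP : ∀ a ∈ P, before x a = false) :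
    PySem.List.insertBy before x (P ++ Q) = P ++ PySem.List.insertBy before x Q := by
  induction P with
  | nil => simp
  | cons a P ih =>
    have ha : before x a = false := hP a (List.mem_cons_self ..)
    simp only [List.cons_append, PySem.List.insertBy, ha]
    rw [ih (fun b hb => hP b (List.mem_cons_of_mem _ hb))]
    simp

-- insertBy goes straight to the front when it precedes the head (or the list is empty)
theorem insertBy_front (before : List Int → List Int → Bool) (x : List Int)
    (l : List (List Int)) (hl : ∀ y ∈ l, before x y = true) :
    PySem.List.insertBy before x l = x :: l := by
  cases l with
  | nil => rfl
  | cons y ys => simp [PySem.List.insertBy, hl y (List.mem_cons_self ..)]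

-- B's stable descending sort splits as: the max-count elements in original order, then a strictly smaller-count tail
theorem sorted_rev_struct (reference : List Int) (xs : List (List Int)) :
    ∃ D, PySem.List.sorted xs (mostcomCnt reference) true
        = xs.filter (fun s => decide (mostcomCnt reference s = mostcomMax reference xs)) ++ D
      ∧ ∀ y ∈ D, mostcomCnt reference y < mostcomMax reference xs := by
  induction xs using List.reverseRecOn with
  | nil =>
    refine ⟨[], ?_, by simp⟩
    rw [PySem.List.sorted_rev_eq_foldl_insertBy]; simp
  | append_singleton xs x ih =>
    obtain ⟨D, hEq, hD⟩ := ih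
    have hsnoc : PySem.List.sorted (xs ++ [x]) (mostcomCnt reference) true
        = PySem.List.insertBy
            (fun a b => decide (mostcomCnt reference b < mostcomCnt reference a)) x
            (PySem.List.sorted xs (mostcomCnt reference) true) := by
      rw [PySem.List.sorted_rev_eq_foldl_insertBy, PySem.List.sorted_rev_eq_foldl_insertBy,
        List.foldl_append]
      simp
    set k := mostcomCnt reference with hk
    set M := mostcomMax reference xs with hM
    set P := xs.filter (fun s => decide (k s = M)) with hP
    have hPmem : ∀ a ∈ P, k a = M := by
      intro a ha
      have := List.of_mem_filter ha
      simpa using this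
    rw [mostcomMax_append]
    rcases lt_trichotomy M (k x) with hlt | heq | hgt
    · -- new strictly larger max: x goes to the very front
      have hmax : max M (k x) = k x := max_eq_right (le_of_lt hlt)
      rw [hmax]
      have hfront : PySem.List.insertBy
          (fun a b => decide (k b < k a)) x
          (PySem.List.sorted xs k true) = x :: PySem.List.sorted xs k true := by
        apply insertBy_front
        intro y hy
        have hyxs : y ∈ xs := (PySem.List.mem_sorted xs k true y).mp hy
        have := cnt_le_mostcomMax reference xs y hyxs
        rw [← hk, ← hM] at this
        simp only [decide_eq_true_eq]
        omega
      have hfx : xs.filter (fun s => decide (k s = k x)) = [] := by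
        rw [List.filter_eq_nil_iff]
        intro t ht
        have := cnt_le_mostcomMax reference xs t ht
        rw [← hk, ← hM] at this
        simp only [decide_eq_true_eq]
        intro he; omega
      refine ⟨P ++ D, ?_, ?_⟩
      · rw [hsnoc, hfront, List.filter_append, hfx, hEq]
        simp
      · intro y hy
        rcases List.mem_append.mp hy with h | h
        · have := hPmem y h; omega
        · have := hD y h; omega
    · -- x ties the max: it lands right after the max-count prefix
      have hmax : max M (k x) = M := max_eq_left (le_of_eq heq.symm)
      rw [hmax]
      have hpass : PySem.List.insertBy (fun a b => decide (k b < k a)) x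
          (P ++ D) = P ++ PySem.List.insertBy (fun a b => decide (k b < k a)) x D := by
        apply insertBy_pass
        intro a ha
        have := hPmem a ha
        simp only [decide_eq_false_iff_not]
        omega
      have hfrontD : PySem.List.insertBy (fun a b => decide (k b < k a)) x D = x :: D := by
        apply insertBy_front
        intro y hy
        have := hD y hy
        simp only [decide_eq_true_eq]
        omega
      refine ⟨D, ?_, ?_⟩
      · rw [hsnoc, hEq, hpass, hfrontD, List.filter_append]
        simp [heq.symm, hP]
      · intro y hy; have := hD y hy; omega
    · -- smaller count: x disappears into the tail
      have hmax : max M (k x) = M := max_eq_left (le_of_lt hgt)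
      rw [hmax]
      have hpass : PySem.List.insertBy (fun a b => decide (k b < k a)) x
          (P ++ D) = P ++ PySem.List.insertBy (fun a b => decide (k b < k a)) x D := by
        apply insertBy_pass
        intro a ha
        have := hPmem a ha
        simp only [decide_eq_false_iff_not]
        omega
      refine ⟨PySem.List.insertBy (fun a b => decide (k b < k a)) x D, ?_, ?_⟩
      · rw [hsnoc, hEq, hpass, List.filter_append]
        have : decide (k x = M) = false := by simp; omega
        simp [this, hP]
      · intro y hy
        rcases (PySem.List.mem_insertBy _ _ _ _).mp hy with h | h
        · subst h; omega
        · exact hD y h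

theorem mostcomTake_prefix (k : List Int → Int) (best : Int) (P D : List (List Int))
    (hP : ∀ a ∈ P, k a = best) (hD : ∀ y ∈ D, k y ≠ best) :
    mostcomTake k best (P ++ D) = P := by
  induction P with
  | nil =>
    cases D with
    | nil => rfl
    | cons y ys => simp [mostcomTake, hD y (List.mem_cons_self ..)]
  | cons a P ih =>
    have ha : k a = best := hP a (List.mem_cons_self ..)
    simp only [List.cons_append, mostcomTake, ha]
    simp [ih (fun b hb => hP b (List.mem_cons_of_mem _ hb))]

-- B returns exactly the max-count sublists in original order
theorem mostcom_alt_eq (reference : List Int) (tocheck : List (List Int)) :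
    mostcom_alt reference tocheck
      = tocheck.filter (fun s => decide (mostcomCnt reference s = mostcomMax reference tocheck)) := by
  obtain ⟨D, hEq, hD⟩ := sorted_rev_struct reference tocheck
  unfold mostcom_alt
  cases hs : PySem.List.sorted tocheck (mostcomCnt reference) true with
  | nil =>
    have hnil : tocheck = [] := (PySem.List.sorted_eq_nil_iff ..).mp hs
    subst hnil; simp
  | cons h0 rest =>
    have hh0mem : h0 ∈ tocheck := by
      have : h0 ∈ PySem.List.sorted tocheck (mostcomCnt reference) true := by
        rw [hs]; exact List.mem_cons_self ..
      exact (PySem.List.mem_sorted ..).mp this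
    have hle : mostcomCnt reference h0 ≤ mostcomMax reference tocheck :=
      cnt_le_mostcomMax reference tocheck h0 hh0mem
    have hge : mostcomMax reference tocheck ≤ mostcomCnt reference h0 := by
      have hMfold : mostcomMax reference tocheck
          = (tocheck.map (mostcomCnt reference)).foldl max 0 := by
        simp [mostcomMax, List.foldl_map]
      rcases PySem.List.foldl_max_mem (tocheck.map (mostcomCnt reference)) 0 with h | h
      · rw [hMfold, h]; exact mostcomCnt_nonneg reference h0
      · obtain ⟨y, hy, hky⟩ := List.mem_map.mp h
        rw [hMfold, ← hky]
        exact PySem.List.key_head_sorted_rev_ge tocheck (mostcomCnt reference) hs y hy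
    have hbest : mostcomCnt reference h0 = mostcomMax reference tocheck := le_antisymm hle hge
    have hPD : h0 :: rest
        = tocheck.filter (fun s => decide (mostcomCnt reference s = mostcomMax reference tocheck)) ++ D :=
      hs.symm.trans hEq
    show mostcomTake (mostcomCnt reference) (mostcomCnt reference h0) (h0 :: rest)
      = tocheck.filter (fun s => decide (mostcomCnt reference s = mostcomMax reference tocheck))
    rw [hbest, hPD]
    exact mostcomTake_prefix _ _ _ _
      (fun a ha => by simpa using List.of_mem_filter ha)
      (fun y hy => by have := hD y hy; omega)

-- ===== VERDICT (by name: the statement is the Claim_ definition above) =====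
theorem mostcom_spec : Claim_equal_mostcom := by
  intro reference tocheck _
  unfold Spec_mostcom mostcom
  rw [mostcom_invariant]
  exact (mostcom_alt_eq reference tocheck).symm
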